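-- pv_equiv track=rewrite | github.com/MarkinHaus/ToolBoxV2 | toolboxv2/utils/clis/cli_jsx_server.py | _build_importmap
-- ===== SOURCE A (Python) =====
-- REACT_CDN = "https://esm.sh/react@18.3.1"
--
-- REACT_DOM_CDN = "https://esm.sh/react-dom@18.3.1/client"
--
-- ESM_LIBS = {
--     "lucide-react": "https://esm.sh/lucide-react@0.383.0",
--     "recharts": "https://esm.sh/recharts@2.15.3?external=react,react-dom",
--     "mathjs": "https://esm.sh/mathjs@13.2.3",
--     "lodash": "https://esm.sh/lodash@4.17.21",
--     "d3": "https://esm.sh/d3@7.9.0",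
--     "three": "https://esm.sh/three@0.170.0",
--     "papaparse": "https://esm.sh/papaparse@5.5.2",
--     "chart.js": "https://esm.sh/chart.js@4.4.8",
--     "tone": "https://esm.sh/tone@15.1.22",
-- }
--
-- def _build_importmap(jsx_source: str) -> dict:
--     """Scan JSX source for imports and build an import map."""
--     imports = {
--         "react": REACT_CDN,
--         "react-dom": REACT_DOM_CDN + "/../",
--         "react-dom/client": REACT_DOM_CDN,
--         "react/": REACT_CDN + "/",
--     }
--     for lib, url in ESM_LIBS.items():
--         # Only include libs that are actually imported
--         if f'from "{lib}"' in jsx_source or f"from '{lib}'" in jsx_source: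
--             imports[lib] = url
--     return {"imports": imports}
-- ===== SOURCE B (Python) =====
-- REACT_CDN = "https://esm.sh/react@18.3.1"
--
-- REACT_DOM_CDN = "https://esm.sh/react-dom@18.3.1/client"
--
-- ESM_LIBS = {
--     "lucide-react": "https://esm.sh/lucide-react@0.383.0",
--     "recharts": "https://esm.sh/recharts@2.15.3?external=react,react-dom",
--     "mathjs": "https://esm.sh/mathjs@13.2.3",
--     "lodash": "https://esm.sh/lodash@4.17.21",
--     "d3": "https://esm.sh/d3@7.9.0",
--     "three": "https://esm.sh/three@0.170.0",
--     "papaparse": "https://esm.sh/papaparse@5.5.2",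
--     "chart.js": "https://esm.sh/chart.js@4.4.8",
--     "tone": "https://esm.sh/tone@15.1.22",
-- }
--
--
-- def _first_spec(text, start, q):
--     """Characters of text[start:] up to (excluding) the first quote q, or None if q never occurs."""
--     spec = []
--     for i in range(start, len(text)):
--         ch = text[i]
--         if ch == q:
--             return "".join(spec)
--         spec.append(ch)
--     return None
--
--
-- def _scan_imports(jsx_source, q):
--     """All module specifiers appearing as  from <q>...<q>  in the source, for one quote style."""
--     found = set()
--     marker = "from " + q
--     for i in range(len(jsx_source)):
--         if jsx_source.startswith(marker, i):
--             spec = _first_spec(jsx_source, i + len(marker), q)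
--             if spec is not None:
--                 found.add(spec)
--     return found
--
--
-- def _build_importmap(jsx_source: str) -> dict:
--     """Scan JSX source once for import specifiers, then map the known ones to their CDN URLs."""
--     found = _scan_imports(jsx_source, '"') | _scan_imports(jsx_source, "'")
--     imports = dict(
--         [
--             ("react", REACT_CDN),
--             ("react-dom", REACT_DOM_CDN + "/../"),
--             ("react-dom/client", REACT_DOM_CDN),
--             ("react/", REACT_CDN + "/"),
--         ]
--         + [(lib, url) for lib, url in ESM_LIBS.items() if lib in found]
--     )
--     return {"imports": imports}
-- ===== Notes on version B (the rewrite author's own statement) =====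
-- stated objective: alternative
-- what changed: A searches the whole source twice per known library (18 substring scans); B scans the source once, collecting every module specifier quoted after `from` (either quote style) into a set, and then looks each of the 9 known libraries up in that set.
import Mathlib
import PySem

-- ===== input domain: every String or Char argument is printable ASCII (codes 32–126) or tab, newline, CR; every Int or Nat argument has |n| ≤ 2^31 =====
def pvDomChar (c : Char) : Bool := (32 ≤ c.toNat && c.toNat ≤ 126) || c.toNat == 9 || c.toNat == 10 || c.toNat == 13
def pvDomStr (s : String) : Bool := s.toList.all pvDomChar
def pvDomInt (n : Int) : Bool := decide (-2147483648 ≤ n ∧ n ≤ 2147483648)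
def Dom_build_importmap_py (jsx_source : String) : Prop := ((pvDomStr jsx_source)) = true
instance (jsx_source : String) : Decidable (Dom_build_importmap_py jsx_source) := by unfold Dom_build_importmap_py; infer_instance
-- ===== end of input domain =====

-- B replaces A's per-library substring scans (two `in` searches over the whole source for each
-- of the 9 known libraries) by ONE scan of the source collecting every module specifier quoted
-- after `from` (either quote style) into a set, then a lookup of each known library in that set
-- (objective: alternative).

-- Module constants shared by both programs (REACT_CDN, REACT_DOM_CDN, ESM_LIBS); the two
-- react-dom entries are `REACT_DOM_CDN + "/../"` and `REACT_CDN + "/"` written as the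
-- concatenated literals.
def pvBaseImports : List (String × String) :=
  [("react", "https://esm.sh/react@18.3.1"),
   ("react-dom", "https://esm.sh/react-dom@18.3.1/client/../"),
   ("react-dom/client", "https://esm.sh/react-dom@18.3.1/client"),
   ("react/", "https://esm.sh/react@18.3.1/")]

def pvEsmLibs : List (String × String) :=
  [("lucide-react", "https://esm.sh/lucide-react@0.383.0"),
   ("recharts", "https://esm.sh/recharts@2.15.3?external=react,react-dom"),
   ("mathjs", "https://esm.sh/mathjs@13.2.3"),
   ("lodash", "https://esm.sh/lodash@4.17.21"),
   ("d3", "https://esm.sh/d3@7.9.0"),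
   ("three", "https://esm.sh/three@0.170.0"),
   ("papaparse", "https://esm.sh/papaparse@5.5.2"),
   ("chart.js", "https://esm.sh/chart.js@4.4.8"),
   ("tone", "https://esm.sh/tone@15.1.22")]

-- ===== PORT A =====
-- `f'from "{lib}"' in jsx_source` is ported as PySem.Chars.isIn on the concatenated character
-- lists (exact: PySem.Str.isIn sub s = PySem.Chars.isIn sub.toList s.toList).
def build_importmap_py (jsx_source : String) : List (String × List (String × String)) :=
  let imports : PySem.Dict String String := PySem.Dict.ofList pvBaseImports
  let imports := pvEsmLibs.foldl (fun d p =>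
      if PySem.Chars.isIn ("from \"".toList ++ p.1.toList ++ ['"']) jsx_source.toList
         || PySem.Chars.isIn ("from '".toList ++ p.1.toList ++ ['\'']) jsx_source.toList
      then d.insert p.1 p.2 else d) imports
  [("imports", imports.items)]

-- ===== PORT B =====
-- _first_spec(text, start, q): the characters of text[start:] before the first quote q, None if
-- q never occurs; ported on the suffix list text[start:] (the index loop from start reads exactly
-- its characters in order).
def pvFirstSpec (q : Char) : List Char → Option (List Char)
  | [] => none
  | c :: t => if c = q then some [] else (pvFirstSpec q t).map (fun sp => c :: sp)

-- _scan_imports(jsx_source, q): the index loop `for i in range(len(src)): if src.startswith(marker, i)`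
-- ported as structural recursion over suffixes (src.startswith(marker, i) checks marker against
-- src[i:], i.e. against each successive suffix, and _first_spec then reads src[i+6:], the suffix
-- with the 6-character marker "from " + q dropped).
def pvScan (q : Char) : List Char → List String
  | [] => []
  | c :: rest =>
      (if PySem.Chars.startswith (c :: rest) ("from ".toList ++ [q]) then
         match pvFirstSpec q ((c :: rest).drop 6) with
         | some spec => [String.ofList spec]
         | none => []
       else []) ++ pvScan q rest

-- `found` is a Python set built by repeated .add during the scan: PySem.Set.ofList is exactly
-- that fold (PySem.Set.ofList_eq_foldl); the two scans are combined with `|` = PySem.Set.union.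
def build_importmap_py_alt (jsx_source : String) : List (String × List (String × String)) :=
  let found : PySem.Set String :=
    PySem.Set.union (PySem.Set.ofList (pvScan '"' jsx_source.toList))
                    (PySem.Set.ofList (pvScan '\'' jsx_source.toList))
  let imports : PySem.Dict String String :=
    PySem.Dict.ofList (pvBaseImports ++ pvEsmLibs.filter (fun p => found.contains p.1))
  [("imports", imports.items)]

-- ===== PRECONDITION & SPEC =====
def Spec_build_importmap_py (jsx_source : String) (out : List (String × List (String × String))) : Prop := out = build_importmap_py_alt jsx_source
instance (jsx_source : String) (out : List (String × List (String × String))) : Decidable (Spec_build_importmap_py jsx_source out) := by unfold Spec_build_importmap_py; infer_instance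

-- ===== CLAIM (what is proved, stated in full; the proofs are below) =====
def Claim_equal_build_importmap_py : Prop := ∀ (jsx_source : String), Dom_build_importmap_py jsx_source → Spec_build_importmap_py jsx_source (build_importmap_py jsx_source)

-- ===== LEMMAS AND PROOFS =====

-- the two per-library conditions, named for the proofs (definitionally the inline lambdas of the ports)
def pvCondA (jsx_source : String) (p : String × String) : Bool :=
  PySem.Chars.isIn ("from \"".toList ++ p.1.toList ++ ['"']) jsx_source.toList
  || PySem.Chars.isIn ("from '".toList ++ p.1.toList ++ ['\'']) jsx_source.toList

def pvCondB (jsx_source : String) (p : String × String) : Bool :=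
  (PySem.Set.union (PySem.Set.ofList (pvScan '"' jsx_source.toList))
    (PySem.Set.ofList (pvScan '\'' jsx_source.toList))).contains p.1

-- pvFirstSpec finds exactly the quote-free prefixes closed by q.
theorem pvFirstSpec_eq_some_iff (q : Char) :
    ∀ (u lib : List Char), q ∉ lib → (pvFirstSpec q u = some lib ↔ lib ++ [q] <+: u) := by
  intro u
  induction u with
  | nil => intro lib _; simp [pvFirstSpec]
  | cons c t ih =>
      intro lib hq
      by_cases hc : c = q
      · subst hc
        cases lib with
        | nil => simp [pvFirstSpec, List.cons_prefix_cons]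
        | cons a l =>
            have ha : a ≠ c := fun h => hq (h ▸ List.mem_cons_self)
            simp [pvFirstSpec, List.cons_prefix_cons, ha]
      · cases lib with
        | nil =>
            simp only [pvFirstSpec, if_neg hc, Option.map_eq_some_iff, List.nil_append,
              List.cons_prefix_cons]
            constructor
            · rintro ⟨sp, -, heq⟩; simp at heq
            · rintro ⟨h, -⟩; exact absurd h.symm hc
        | cons a l =>
            have hql : q ∉ l := fun h => hq (List.mem_cons_of_mem _ h)
            simp only [pvFirstSpec, if_neg hc, Option.map_eq_some_iff, List.cons_append,
              List.cons_prefix_cons]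
            constructor
            · rintro ⟨sp, hsp, heq⟩
              injection heq with h1 h2
              subst h1; subst h2
              exact ⟨rfl, (ih _ hql).mp hsp⟩
            · rintro ⟨rfl, hpre⟩
              exact ⟨l, (ih l hql).mpr hpre, rfl⟩

-- pvScan finds exactly the (quote-free) specifiers lib with `from <q>lib<q>` a substring.
theorem mem_pvScan_iff (q : Char) (lib : String) (hq : q ∉ lib.toList) (s : List Char) :
    lib ∈ pvScan q s ↔ ("from ".toList ++ [q]) ++ (lib.toList ++ [q]) <:+: s := by
  induction s with
  | nil => simp [pvScan]
  | cons c rest ih =>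
      have hhead : lib ∈ (if PySem.Chars.startswith (c :: rest) ("from ".toList ++ [q]) then
            match pvFirstSpec q ((c :: rest).drop 6) with
            | some spec => [String.ofList spec]
            | none => []
          else []) ↔ ("from ".toList ++ [q]) ++ (lib.toList ++ [q]) <+: c :: rest := by
        by_cases hs : PySem.Chars.startswith (c :: rest) ("from ".toList ++ [q]) = true
        · have hpre : ("from ".toList ++ [q]) <+: c :: rest := by
            simp only [PySem.Chars.startswith, List.isPrefixOf_iff_prefix] at hs
            exact hs
          obtain ⟨u, hu⟩ := hpre
          have hdrop : (c :: rest).drop 6 = u := by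
            rw [← hu]
            have hlen : ("from ".toList ++ [q]).length = 6 := by simp
            have hd : (("from ".toList ++ [q]) ++ u).drop (("from ".toList ++ [q]).length) = u :=
              List.drop_left
            rw [hlen] at hd
            exact hd
          have hmatch : lib ∈ (match pvFirstSpec q ((c :: rest).drop 6) with
              | some spec => [String.ofList spec]
              | none => ([] : List String)) ↔ pvFirstSpec q u = some lib.toList := by
            rw [hdrop]
            cases hfs : pvFirstSpec q u with
            | none => simp
            | some sp =>
                simp only [List.mem_singleton, Option.some.injEq]
                constructor
                · rintro rfl; simp
                · intro h; rw [h, String.ofList_toList]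
          rw [if_pos hs, hmatch, pvFirstSpec_eq_some_iff q u lib.toList hq, ← hu,
            List.prefix_append_right_inj]
        · rw [if_neg hs]
          simp only [List.not_mem_nil, false_iff]
          intro hcon
          obtain ⟨t, ht⟩ := hcon
          exact hs (by
            simp only [PySem.Chars.startswith, List.isPrefixOf_iff_prefix]
            exact ⟨lib.toList ++ [q] ++ t, by rw [← ht]; simp⟩)
      rw [pvScan]
      simp only [List.mem_append, hhead, ih, List.infix_cons_iff]

-- conditional insert over a list = unconditional insert over the filtered list
theorem foldl_ite_insert {κ ν : Type} [BEq κ] (c : κ × ν → Bool) :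
    ∀ (l : List (κ × ν)) (d : PySem.Dict κ ν),
      l.foldl (fun d p => if c p then d.insert p.1 p.2 else d) d
        = (l.filter c).foldl (fun d p => d.insert p.1 p.2) d := by
  intro l
  induction l with
  | nil => intro d; rfl
  | cons p t ih =>
      intro d
      by_cases hp : c p <;> simp [hp, ih]

-- a dict built from pairs with pairwise-distinct keys lists exactly those pairs
theorem items_ofList_of_nodup_keys {κ ν : Type} [BEq κ] [LawfulBEq κ]
    (l : List (κ × ν)) (h : (l.map Prod.fst).Nodup) :
    (PySem.Dict.ofList l).items = l := by
  have := PySem.Dict.items_foldl_insert_fresh l Prod.fst Prod.snd PySem.Dict.empty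
    (fun a _ => by simp [pysem]) h
  simpa [PySem.Dict.ofList, PySem.Dict.update] using this

-- the per-library conditions of A and B agree
theorem cond_eq (jsx_source : String) (p : String × String) (hp : p ∈ pvEsmLibs) :
    pvCondA jsx_source p = pvCondB jsx_source p := by
  have hnq : ∀ r ∈ pvEsmLibs, '"' ∉ r.1.toList ∧ '\'' ∉ r.1.toList := by decide
  have h1 : '"' ∉ p.1.toList := (hnq p hp).1
  have h2 : '\'' ∉ p.1.toList := (hnq p hp).2
  have e1 : "from \"".toList ++ p.1.toList ++ ['"']
      = ("from ".toList ++ ['"']) ++ (p.1.toList ++ ['"']) := by simp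
  have e2 : "from '".toList ++ p.1.toList ++ ['\'']
      = ("from ".toList ++ ['\'']) ++ (p.1.toList ++ ['\'']) := by simp
  rw [Bool.eq_iff_iff]
  simp only [pvCondA, pvCondB, Bool.or_eq_true, PySem.Chars.isIn_iff_infix,
    PySem.Set.contains_iff, PySem.Set.mem_union, PySem.Set.mem_ofList, e1, e2,
    mem_pvScan_iff '"' p.1 h1 jsx_source.toList, mem_pvScan_iff '\'' p.1 h2 jsx_source.toList]

theorem build_importmap_py_eq_alt (jsx_source : String) :
    build_importmap_py jsx_source = build_importmap_py_alt jsx_source := by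
  have e1 : build_importmap_py jsx_source
      = [("imports", (pvEsmLibs.foldl
          (fun d p => if pvCondA jsx_source p then d.insert p.1 p.2 else d)
          (PySem.Dict.ofList pvBaseImports)).items)] := rfl
  have e2 : build_importmap_py_alt jsx_source
      = [("imports", (PySem.Dict.ofList
          (pvBaseImports ++ pvEsmLibs.filter (pvCondB jsx_source))).items)] := rfl
  have hfilter : pvEsmLibs.filter (pvCondA jsx_source) = pvEsmLibs.filter (pvCondB jsx_source) :=
    List.filter_congr (fun p hp => cond_eq jsx_source p hp)
  have hsubA : List.Sublist ((pvEsmLibs.filter (pvCondA jsx_source)).map Prod.fst) (pvEsmLibs.map Prod.fst) :=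
    List.Sublist.map Prod.fst List.filter_sublist
  have hnodupA : ((pvEsmLibs.filter (pvCondA jsx_source)).map Prod.fst).Nodup :=
    List.Nodup.sublist hsubA (by decide)
  have hitemsA := PySem.Dict.items_foldl_insert_fresh
    (pvEsmLibs.filter (pvCondA jsx_source)) Prod.fst Prod.snd
    (PySem.Dict.ofList pvBaseImports)
    (fun p hp => (by decide : ∀ r ∈ pvEsmLibs,
        (PySem.Dict.ofList pvBaseImports : PySem.Dict String String).contains r.1 = false)
      p (List.mem_of_mem_filter hp))
    hnodupA
  have hsubB : List.Sublist ((pvBaseImports ++ pvEsmLibs.filter (pvCondB jsx_source)).map Prod.fst)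
      ((pvBaseImports ++ pvEsmLibs).map Prod.fst) :=
    List.Sublist.map Prod.fst (List.Sublist.append_left List.filter_sublist pvBaseImports)
  have hitemsB := items_ofList_of_nodup_keys
    (pvBaseImports ++ pvEsmLibs.filter (pvCondB jsx_source))
    (List.Nodup.sublist hsubB (by decide))
  have hbase : (PySem.Dict.ofList pvBaseImports : PySem.Dict String String).items
      = pvBaseImports := by decide
  rw [e1, e2, foldl_ite_insert (pvCondA jsx_source), hitemsB, hitemsA, hbase, hfilter]
  simp

-- ===== VERDICT (by name: the statement is the Claim_ definition above) =====
theorem build_importmap_py_spec : Claim_equal_build_importmap_py := by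
  intro jsx_source _
  unfold Spec_build_importmap_py
  exact build_importmap_py_eq_alt jsx_source
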